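-- pv_equiv track=rewrite | github.com/TongWu/IT5001-SoftwareDevFundamental | Lab/PE Notes/TextCompare.py | compareDNA_R
-- ===== SOURCE A (Python) =====
-- def compareDNA_R(dna1,dna2):
--     dna_compare = ''
--     if not dna1:
--         return ''
--     if dna1[0] == dna2[0]:
--         dna_compare = '*'
--     else:
--         dna_compare = '.'
--     return dna_compare + compareDNA_R(dna1[1:], dna2[1:])
-- ===== SOURCE B (Python) =====
-- def compareDNA_R(dna1, dna2):
--     result = []
--     for i in range(len(dna1)):
--         result.append('*' if dna1[i] == dna2[i] else '.')
--     return ''.join(result)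
-- ===== Notes on version B (the rewrite author's own statement) =====
-- stated objective: faster
-- what changed: Replaces head/tail recursion with repeated string slicing and concatenation by a single indexed loop that appends one mark per position and joins once at the end.
import Mathlib
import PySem

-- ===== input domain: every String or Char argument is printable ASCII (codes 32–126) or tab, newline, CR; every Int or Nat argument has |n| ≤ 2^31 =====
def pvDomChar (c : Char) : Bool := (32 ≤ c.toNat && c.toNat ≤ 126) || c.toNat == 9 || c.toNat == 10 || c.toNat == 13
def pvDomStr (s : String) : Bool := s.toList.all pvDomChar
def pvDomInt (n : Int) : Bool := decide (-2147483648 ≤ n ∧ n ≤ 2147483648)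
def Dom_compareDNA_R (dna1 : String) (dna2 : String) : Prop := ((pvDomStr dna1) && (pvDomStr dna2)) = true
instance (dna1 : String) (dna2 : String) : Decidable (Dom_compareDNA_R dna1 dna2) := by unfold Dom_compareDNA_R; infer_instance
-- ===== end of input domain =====

-- B replaces A's head/tail recursion (with O(n) slicing and string concatenation per step)
-- by a single indexed loop appending one mark per position, joined once at the end.


-- ===== PORT A =====
-- A's recursion, step for step over the character lists; dna2[0] on an empty dna2
-- raises IndexError in Python — exactly the inputs Pre_compareDNA_R excludes.
def compareDNA_R_core : List Char → List Char → List Char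
  | [], _ => []
  | c :: t1, l2 =>
      -- dna1[0] == dna2[0]; l2 = [] is a Python IndexError, excluded by Pre_
      match l2 with
      | [] => []
      | d :: t2 => (if c == d then '*' else '.') :: compareDNA_R_core t1 t2

def compareDNA_R (dna1 : String) (dna2 : String) : String :=
  String.mk (compareDNA_R_core dna1.toList dna2.toList)

-- ===== PORT B =====
-- Source B: result = []; for i in range(len(dna1)): result.append(...); return ''.join(result)
-- indexing is exact under Pre_ (both i < len(dna1) and i < len(dna2) hold there)
def compareDNA_R_alt (dna1 : String) (dna2 : String) : String :=
  let l1 := dna1.toList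
  let l2 := dna2.toList
  let result := (List.range l1.length).foldl
    (fun acc i => acc ++ [if l1.getD i ' ' == l2.getD i ' ' then '*' else '.']) []
  String.mk result

-- ===== PRECONDITION & SPEC =====
-- Pre_ excludes exactly the inputs where A (and B alike) raises IndexError: dna1 longer than dna2.
def Pre_compareDNA_R (dna1 : String) (dna2 : String) : Prop :=
  dna1.toList.length ≤ dna2.toList.length
instance (dna1 : String) (dna2 : String) : Decidable (Pre_compareDNA_R dna1 dna2) := by
  unfold Pre_compareDNA_R; infer_instance

def pvWitness_compareDNA_R : String × String := ("ATCG", "ACCG")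

def Spec_compareDNA_R (dna1 : String) (dna2 : String) (out : String) : Prop := out = compareDNA_R_alt dna1 dna2
instance (dna1 : String) (dna2 : String) (out : String) : Decidable (Spec_compareDNA_R dna1 dna2 out) := by unfold Spec_compareDNA_R; infer_instance

-- ===== CLAIM (what is proved, stated in full; the proofs are below) =====
def Claim_equal_compareDNA_R : Prop := ∀ (dna1 : String) (dna2 : String), Dom_compareDNA_R dna1 dna2 → Pre_compareDNA_R dna1 dna2 → Spec_compareDNA_R dna1 dna2 (compareDNA_R dna1 dna2)

-- ===== LEMMAS AND PROOFS =====
theorem pv_foldl_append {α β : Type} (f : α → β) (xs : List α) (a : List β) :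
    xs.foldl (fun acc i => acc ++ [f i]) a = a ++ xs.map f := by
  induction xs generalizing a with
  | nil => simp
  | cons x t ih => simp [List.foldl, ih]

theorem pv_core_eq_map (l1 l2 : List Char) (h : l1.length ≤ l2.length) :
    compareDNA_R_core l1 l2 =
      (List.range l1.length).map
        (fun i => if l1.getD i ' ' == l2.getD i ' ' then '*' else '.') := by
  induction l1 generalizing l2 with
  | nil => simp [compareDNA_R_core]
  | cons c t1 ih =>
    cases l2 with
    | nil => simp at h
    | cons d t2 =>
      simp only [List.length_cons, Nat.add_le_add_iff_right] at h
      simp [compareDNA_R_core, List.range_succ_eq_map, ih t2 h,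
        List.map_map, Function.comp]

-- ===== VERDICT (by name: the statement is the Claim_ definition above) =====
theorem compareDNA_R_spec : Claim_equal_compareDNA_R := by
  intro dna1 dna2 _ hpre
  unfold Spec_compareDNA_R compareDNA_R compareDNA_R_alt
  simp only []
  rw [pv_core_eq_map _ _ hpre, pv_foldl_append, List.nil_append]
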